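-- pv_equiv track=rewrite | github.com/bonglrob/mosquito | mosquito.py | get_capital
-- ===== SOURCE A (Python) =====
-- def get_capital(county: str) -> str:
--     """
--     This funciton takes a county name (str) and returns the capital city
--     that the county belongs to.
--     """
--     gp_eureka = ["Humboldt", "Del Norte", "Lake", "Mendocino", "Modoc",
--                  "Shasta", "Siskiyou", "Tahama", "Trinity"]
--     gp_fresno = ["Fresno", "Inyo", "Kern", "Kings", "Madera", "Mariposa",
--                  "Merced", "Mono", "Tulare", "Tuolumne"]
--     gp_sacramento = ["Sacramento", "Alpine", "Amador", "Butte", "Calaveras",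
--                      "Colusa", "El Dorado", "Glenn", "Lassen", "Nevada",
--                      "Placer", "Plumas", "Sutter", "Sierra", "Stanislaus",
--                      "Solano", "Yolo", "Yuba"]
--     gp_sd = ["San Diego", "Imperial"]
--     gp_sf = ["San Francisco", "Alameda", "Contra Costa", "Marin",
--              "Napa", "San Mateo", "Santa Clara", "Santa Cruz", "Sonoma"]
--     gp_la = ["Los Angeles", "Monterey", "Orange", "Riverside", "San Benito",
--              "San Bernardino", "San Joaquin", "Santa Barbara",
--              "San Luis Obispo", "Ventura"]
--     groups = [gp_eureka, gp_fresno, gp_sacramento, gp_sd, gp_sf, gp_la]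
--     for group in groups:
--         if county in group:
--             capital = group[0]
--             if capital == 'Humboldt':
--                 return 'Eureka'
--             return capital
--     return None
-- ===== SOURCE B (Python) =====
-- _CAPITALS = {
--     "Humboldt": "Eureka", "Del Norte": "Eureka", "Lake": "Eureka",
--     "Mendocino": "Eureka", "Modoc": "Eureka", "Shasta": "Eureka",
--     "Siskiyou": "Eureka", "Tahama": "Eureka", "Trinity": "Eureka",
--     "Fresno": "Fresno", "Inyo": "Fresno", "Kern": "Fresno",
--     "Kings": "Fresno", "Madera": "Fresno", "Mariposa": "Fresno",
--     "Merced": "Fresno", "Mono": "Fresno", "Tulare": "Fresno",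
--     "Tuolumne": "Fresno",
--     "Sacramento": "Sacramento", "Alpine": "Sacramento",
--     "Amador": "Sacramento", "Butte": "Sacramento",
--     "Calaveras": "Sacramento", "Colusa": "Sacramento",
--     "El Dorado": "Sacramento", "Glenn": "Sacramento",
--     "Lassen": "Sacramento", "Nevada": "Sacramento",
--     "Placer": "Sacramento", "Plumas": "Sacramento",
--     "Sutter": "Sacramento", "Sierra": "Sacramento",
--     "Stanislaus": "Sacramento", "Solano": "Sacramento",
--     "Yolo": "Sacramento", "Yuba": "Sacramento",
--     "San Diego": "San Diego", "Imperial": "San Diego",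
--     "San Francisco": "San Francisco", "Alameda": "San Francisco",
--     "Contra Costa": "San Francisco", "Marin": "San Francisco",
--     "Napa": "San Francisco", "San Mateo": "San Francisco",
--     "Santa Clara": "San Francisco", "Santa Cruz": "San Francisco",
--     "Sonoma": "San Francisco",
--     "Los Angeles": "Los Angeles", "Monterey": "Los Angeles",
--     "Orange": "Los Angeles", "Riverside": "Los Angeles",
--     "San Benito": "Los Angeles", "San Bernardino": "Los Angeles",
--     "San Joaquin": "Los Angeles", "Santa Barbara": "Los Angeles",
--     "San Luis Obispo": "Los Angeles", "Ventura": "Los Angeles",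
-- }
--
--
-- def get_capital(county: str) -> str:
--     """
--     This funciton takes a county name (str) and returns the capital city
--     that the county belongs to.
--     """
--     return _CAPITALS.get(county)
-- ===== Notes on version B (the rewrite author's own statement) =====
-- stated objective: simpler
-- what changed: Replaced the six list scans and the Humboldt special-case branch with one precomputed flat dict mapping every county directly to its resolved capital, so the body is a single .get lookup.
import Mathlib
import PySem

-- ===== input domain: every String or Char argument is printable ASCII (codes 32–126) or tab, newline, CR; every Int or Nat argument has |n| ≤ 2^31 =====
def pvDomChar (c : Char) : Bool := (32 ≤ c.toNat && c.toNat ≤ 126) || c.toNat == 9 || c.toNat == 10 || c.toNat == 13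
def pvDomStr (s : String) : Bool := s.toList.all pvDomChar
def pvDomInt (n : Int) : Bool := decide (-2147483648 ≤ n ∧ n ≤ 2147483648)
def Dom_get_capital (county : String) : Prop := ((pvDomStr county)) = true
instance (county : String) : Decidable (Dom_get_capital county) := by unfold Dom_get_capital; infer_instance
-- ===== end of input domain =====

-- B replaces A's six sequential list scans plus the Humboldt branch by one flat
-- precomputed county→capital dict and a single .get lookup (objective: simpler).

-- ===== PORT A =====
-- the six groups and their list, exactly as in the Python
def pvGroups : List (List String) :=
  [["Humboldt", "Del Norte", "Lake", "Mendocino", "Modoc",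
    "Shasta", "Siskiyou", "Tahama", "Trinity"],
   ["Fresno", "Inyo", "Kern", "Kings", "Madera", "Mariposa",
    "Merced", "Mono", "Tulare", "Tuolumne"],
   ["Sacramento", "Alpine", "Amador", "Butte", "Calaveras",
    "Colusa", "El Dorado", "Glenn", "Lassen", "Nevada",
    "Placer", "Plumas", "Sutter", "Sierra", "Stanislaus",
    "Solano", "Yolo", "Yuba"],
   ["San Diego", "Imperial"],
   ["San Francisco", "Alameda", "Contra Costa", "Marin",
    "Napa", "San Mateo", "Santa Clara", "Santa Cruz", "Sonoma"],
   ["Los Angeles", "Monterey", "Orange", "Riverside", "San Benito",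
    "San Bernardino", "San Joaquin", "Santa Barbara",
    "San Luis Obispo", "Ventura"]]

-- the 'for group in groups' loop: first group containing county wins
def pvLoopA (county : String) : List (List String) → Option String
  | [] => none
  | g :: rest =>
      if county ∈ g then
        let capital := g.getD 0 ""   -- group[0]; every literal group is nonempty
        if capital = "Humboldt" then some "Eureka" else some capital
      else pvLoopA county rest

def get_capital (county : String) : Option String := pvLoopA county pvGroups

-- ===== PORT B =====
-- the flat precomputed dict _CAPITALS of Source B
def pvCapitals : PySem.Dict String String := PySem.Dict.mk
  [("Humboldt", "Eureka"), ("Del Norte", "Eureka"), ("Lake", "Eureka"),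
   ("Mendocino", "Eureka"), ("Modoc", "Eureka"), ("Shasta", "Eureka"),
   ("Siskiyou", "Eureka"), ("Tahama", "Eureka"), ("Trinity", "Eureka"),
   ("Fresno", "Fresno"), ("Inyo", "Fresno"), ("Kern", "Fresno"),
   ("Kings", "Fresno"), ("Madera", "Fresno"), ("Mariposa", "Fresno"),
   ("Merced", "Fresno"), ("Mono", "Fresno"), ("Tulare", "Fresno"),
   ("Tuolumne", "Fresno"),
   ("Sacramento", "Sacramento"), ("Alpine", "Sacramento"),
   ("Amador", "Sacramento"), ("Butte", "Sacramento"),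
   ("Calaveras", "Sacramento"), ("Colusa", "Sacramento"),
   ("El Dorado", "Sacramento"), ("Glenn", "Sacramento"),
   ("Lassen", "Sacramento"), ("Nevada", "Sacramento"),
   ("Placer", "Sacramento"), ("Plumas", "Sacramento"),
   ("Sutter", "Sacramento"), ("Sierra", "Sacramento"),
   ("Stanislaus", "Sacramento"), ("Solano", "Sacramento"),
   ("Yolo", "Sacramento"), ("Yuba", "Sacramento"),
   ("San Diego", "San Diego"), ("Imperial", "San Diego"),
   ("San Francisco", "San Francisco"), ("Alameda", "San Francisco"),
   ("Contra Costa", "San Francisco"), ("Marin", "San Francisco"),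
   ("Napa", "San Francisco"), ("San Mateo", "San Francisco"),
   ("Santa Clara", "San Francisco"), ("Santa Cruz", "San Francisco"),
   ("Sonoma", "San Francisco"),
   ("Los Angeles", "Los Angeles"), ("Monterey", "Los Angeles"),
   ("Orange", "Los Angeles"), ("Riverside", "Los Angeles"),
   ("San Benito", "Los Angeles"), ("San Bernardino", "Los Angeles"),
   ("San Joaquin", "Los Angeles"), ("Santa Barbara", "Los Angeles"),
   ("San Luis Obispo", "Los Angeles"), ("Ventura", "Los Angeles")]

def get_capital_alt (county : String) : Option String := pvCapitals.get? county

-- ===== PRECONDITION & SPEC =====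
def Spec_get_capital (county : String) (out : Option String) : Prop := out = get_capital_alt county
instance (county : String) (out : Option String) : Decidable (Spec_get_capital county out) := by unfold Spec_get_capital; infer_instance

-- ===== CLAIM (what is proved, stated in full; the proofs are below) =====
def Claim_equal_get_capital : Prop := ∀ (county : String), Dom_get_capital county → Spec_get_capital county (get_capital county)

-- ===== LEMMAS AND PROOFS =====
-- on every county that occurs in some group, the two ports agree (finite check)
theorem pv_hit : ∀ c ∈ pvGroups.flatten, get_capital c = get_capital_alt c := by decide

-- ===== VERDICT (by name: the statement is the Claim_ definition above) =====
theorem get_capital_spec : Claim_equal_get_capital := by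
  intro county _
  unfold Spec_get_capital
  by_cases hc : county ∈ pvGroups.flatten
  · exact pv_hit county hc
  · simp only [pvGroups] at hc
    simp at hc
    rw [show get_capital_alt county = none from by
      simp [get_capital_alt, PySem.Dict.get?_eq_none_iff_not_mem_keys, pvCapitals, hc]]
    simp [get_capital, pvLoopA, pvGroups, hc]
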